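-- pv_equiv track=rewrite | github.com/rnked/adt-dummy | src/adt_dummy/services/trino.py | _main_keyword
-- ===== SOURCE A (Python) =====
-- ALLOWED_START = {
--     "SELECT",
--     "WITH",
--     "SHOW",
--     "DESCRIBE",
--     "EXPLAIN",
--     "VALUES",
--     "USE",
-- }
--
-- FORBIDDEN_KEYWORDS = {
--     "INSERT",
--     "UPDATE",
--     "DELETE",
--     "MERGE",
--     "CREATE",
--     "DROP",
--     "ALTER",
--     "TRUNCATE",
--     "GRANT",
--     "REVOKE",
--     "CALL",
--     "COMMENT",
--     "RENAME",
-- }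
--
-- def _main_keyword(tokens):
--     if not tokens:
--         return None, None
--
--     idx = 0
--     if tokens[0][0] == "WITH":
--         idx = 1
--         if idx < len(tokens) and tokens[idx][0] == "RECURSIVE":
--             idx += 1
--
--     keywords = ALLOWED_START | FORBIDDEN_KEYWORDS | {"SET", "RESET"}
--     for i in range(idx, len(tokens)):
--         token, depth = tokens[i]
--         if depth != 0:
--             continue
--         if token in keywords:
--             if token in {"SET", "RESET"}:
--                 next_token = None
--                 for j in range(i + 1, len(tokens)):
--                     candidate, candidate_depth = tokens[j]
--                     if candidate_depth == 0:
--                         next_token = candidate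
--                         break
--                 return token, next_token
--             return token, None
--     return None, None
-- ===== SOURCE B (Python) =====
-- ALLOWED_START = {
--     "SELECT", "WITH", "SHOW", "DESCRIBE", "EXPLAIN", "VALUES", "USE",
-- }
--
-- FORBIDDEN_KEYWORDS = {
--     "INSERT", "UPDATE", "DELETE", "MERGE", "CREATE", "DROP", "ALTER",
--     "TRUNCATE", "GRANT", "REVOKE", "CALL", "COMMENT", "RENAME",
-- }
--
-- def _main_keyword(tokens):
--     if not tokens:
--         return None, None
--
--     idx = 0
--     if tokens[0][0] == "WITH":
--         idx = 2 if len(tokens) > 1 and tokens[1][0] == "RECURSIVE" else 1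
--
--     # single-pass state machine: no nested rescans; `pending` remembers a
--     # SET/RESET keyword whose following top-level token we still have to see.
--     keywords = ALLOWED_START | FORBIDDEN_KEYWORDS | {"SET", "RESET"}
--     pending = None
--     for tok, depth in tokens[idx:]:
--         if depth != 0:
--             continue
--         if pending is not None:
--             return pending, tok
--         if tok in keywords:
--             if tok in ("SET", "RESET"):
--                 pending = tok
--             else:
--                 return tok, None
--     return pending, None
-- ===== Notes on version B (the rewrite author's own statement) =====
-- stated objective: simpler
-- what changed: B is a single-pass state machine: a `pending` state remembers a seen SET/RESET and the pass itself delivers the next top-level token, eliminating A's nested inner forward scan after SET/RESET.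
import Mathlib
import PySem

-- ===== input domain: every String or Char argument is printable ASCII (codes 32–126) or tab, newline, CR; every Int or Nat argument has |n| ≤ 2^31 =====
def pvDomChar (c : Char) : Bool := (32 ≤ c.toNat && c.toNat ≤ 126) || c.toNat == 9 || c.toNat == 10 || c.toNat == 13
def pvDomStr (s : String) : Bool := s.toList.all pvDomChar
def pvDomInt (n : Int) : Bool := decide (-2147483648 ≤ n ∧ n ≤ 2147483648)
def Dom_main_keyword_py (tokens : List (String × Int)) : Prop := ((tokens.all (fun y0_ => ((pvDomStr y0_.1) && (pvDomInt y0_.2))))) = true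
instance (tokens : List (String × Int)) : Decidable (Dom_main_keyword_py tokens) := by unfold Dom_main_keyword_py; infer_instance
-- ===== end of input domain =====

-- B replaces A's nested forward scan after SET/RESET by a single-pass state machine
-- whose `pending` state delivers the next top-level token (objective: simpler).

-- module-level constant sets, shared by both sources
def pvAllowedStart : List String :=
  ["SELECT", "WITH", "SHOW", "DESCRIBE", "EXPLAIN", "VALUES", "USE"]
def pvForbidden : List String :=
  ["INSERT", "UPDATE", "DELETE", "MERGE", "CREATE", "DROP", "ALTER",
   "TRUNCATE", "GRANT", "REVOKE", "CALL", "COMMENT", "RENAME"]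
def pvKeywords : List String := pvAllowedStart ++ pvForbidden ++ ["SET", "RESET"]

-- ===== PORT A =====
-- inner scan: for j in range(i+1, len(tokens)): first depth-0 candidate
def pvFindNextA : List (String × Int) → Option String
  | [] => none
  | (c, d) :: rest => if d == 0 then some c else pvFindNextA rest

-- outer scan: for i in range(idx, len(tokens))
def pvLoopA : List (String × Int) → Option String × Option String
  | [] => (none, none)
  | (tok, depth) :: rest =>
    if depth ≠ 0 then pvLoopA rest
    else if tok ∈ pvKeywords then
      if tok == "SET" || tok == "RESET" then (some tok, pvFindNextA rest)
      else (some tok, none)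
    else pvLoopA rest

def main_keyword_py (tokens : List (String × Int)) : Option String × Option String :=
  match tokens with
  | [] => (none, none)
  | (t0, _) :: rest =>
    let idx : Nat :=
      if t0 == "WITH" then
        match rest with
        | (t1, _) :: _ => if t1 == "RECURSIVE" then 2 else 1
        | [] => 1
      else 0
    pvLoopA (tokens.drop idx)

-- ===== PORT B =====
-- the state of B's single-pass machine: still searching, a SET/RESET waiting
-- for its next top-level token, or the answer already determined
inductive PvSt : Type
  | search : PvSt
  | pend : String → PvSt
  | stop : Option String × Option String → PvSt
deriving DecidableEq, Repr

def pvStepB (s : PvSt) (p : String × Int) : PvSt :=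
  match s with
  | .stop r => .stop r
  | .pend kw => if p.2 == 0 then .stop (some kw, some p.1) else .pend kw
  | .search =>
    if p.2 ≠ 0 then .search
    else if p.1 ∈ pvKeywords then
      if p.1 == "SET" || p.1 == "RESET" then .pend p.1
      else .stop (some p.1, none)
    else .search

def pvFinishB : PvSt → Option String × Option String
  | .search => (none, none)
  | .pend kw => (some kw, none)
  | .stop r => r

def main_keyword_py_alt (tokens : List (String × Int)) : Option String × Option String :=
  match tokens with
  | [] => (none, none)
  | (t0, _) :: rest =>
    let idx : Nat :=
      if t0 == "WITH" then
        match rest with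
        | (t1, _) :: _ => if t1 == "RECURSIVE" then 2 else 1
        | [] => 1
      else 0
    pvFinishB ((tokens.drop idx).foldl pvStepB .search)

-- ===== PRECONDITION & SPEC =====
def Spec_main_keyword_py (tokens : List (String × Int)) (out : Option String × Option String) : Prop := out = main_keyword_py_alt tokens
instance (tokens : List (String × Int)) (out : Option String × Option String) : Decidable (Spec_main_keyword_py tokens out) := by unfold Spec_main_keyword_py; infer_instance

-- ===== CLAIM (what is proved, stated in full; the proofs are below) =====
def Claim_equal_main_keyword_py : Prop := ∀ (tokens : List (String × Int)), Dom_main_keyword_py tokens → Spec_main_keyword_py tokens (main_keyword_py tokens)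

-- ===== LEMMAS AND PROOFS =====
theorem pvFoldB_stop (l : List (String × Int)) (r : Option String × Option String) :
    l.foldl pvStepB (.stop r) = .stop r := by
  induction l with
  | nil => rfl
  | cons p rest ih => simpa [List.foldl, pvStepB] using ih

theorem pvFoldB_pend (l : List (String × Int)) (kw : String) :
    pvFinishB (l.foldl pvStepB (.pend kw)) = (some kw, pvFindNextA l) := by
  induction l with
  | nil => rfl
  | cons p rest ih =>
    obtain ⟨c, d⟩ := p
    by_cases h : d = 0
    · simp [List.foldl, pvStepB, h, pvFoldB_stop, pvFindNextA, pvFinishB]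
    · simp [List.foldl, pvStepB, h, pvFindNextA, ih]

theorem pvFoldB_search (l : List (String × Int)) :
    pvFinishB (l.foldl pvStepB .search) = pvLoopA l := by
  induction l with
  | nil => rfl
  | cons p rest ih =>
    obtain ⟨tok, d⟩ := p
    by_cases h : d = 0
    · by_cases hk : tok ∈ pvKeywords
      · by_cases hs : (tok == "SET" || tok == "RESET") = true
        · simp [List.foldl, pvStepB, pvLoopA, h, hk, hs, pvFoldB_pend]
        · simp [List.foldl, pvStepB, pvLoopA, h, hk, hs, pvFoldB_stop, pvFinishB]
      · simp [List.foldl, pvStepB, pvLoopA, h, hk, ih]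
    · simp [List.foldl, pvStepB, pvLoopA, h, ih]

-- ===== VERDICT (by name: the statement is the Claim_ definition above) =====
theorem main_keyword_py_spec : Claim_equal_main_keyword_py := by
  intro tokens _
  unfold Spec_main_keyword_py main_keyword_py main_keyword_py_alt
  match tokens with
  | [] => rfl
  | (t0, d0) :: rest => exact (pvFoldB_search _).symm
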